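-- pv_equiv track=rewrite | github.com/mihaelacr/ProjectEuler | Problem38.py | check_multiples
-- ===== SOURCE A (Python) =====
-- def tuple2int(t):
--     return int("".join(map(str, t)))
--
-- def check_multiples(x, tail, multiple):
--     """Recursively check if the digits of the
--     `tail` tuple match incremental multiples of `x`,
--     consuming the matching number of digits from the
--     beginning of the tuple and increasing
--     `multiple` by 1 at each recursion.
--     """
--     if len(tail) == 0:
--         # Base case where we have reached an empty tuple
--         # so it is a successful match
--         return True
--
--     digit_mul = x * multiple
--     nd = len(str(digit_mul))
--
--     # Check if the next `nd` digits in the tuple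
--     # are indeed the expected multiple of x
--     if tuple2int(tail[:nd]) == digit_mul:
--         return check_multiples(x, tail[nd:], multiple + 1)
--     else:
--         return False
-- ===== SOURCE B (Python) =====
-- def tuple2int(t):
--     return int("".join(map(str, t)))
--
-- def check_multiples(x, tail, multiple):
--     """Iteratively check that the digits of `tail` are the
--     concatenated successive multiples of x, walking an index
--     instead of slicing off the front and recursing."""
--     pos = 0
--     n = len(tail)
--     while pos < n:
--         digit_mul = x * multiple
--         nd = len(str(digit_mul))
--         if tuple2int(tail[pos:pos + nd]) != digit_mul:
--             return False
--         pos += nd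
--         multiple += 1
--     return True
-- ===== Notes on version B (the rewrite author's own statement) =====
-- stated objective: simpler
-- what changed: Replaces the slice-and-recurse structure (building a fresh tuple tail[nd:] per step) with a single iterative while-loop that walks a position index over the unchanged tuple.
-- outside the precondition, e.g. on check_multiples(2, (3, -4), 1): A returns False, B returns False; on check_multiples(12, (1, -4), 1): A raises ValueError, B raises ValueError
import Mathlib
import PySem

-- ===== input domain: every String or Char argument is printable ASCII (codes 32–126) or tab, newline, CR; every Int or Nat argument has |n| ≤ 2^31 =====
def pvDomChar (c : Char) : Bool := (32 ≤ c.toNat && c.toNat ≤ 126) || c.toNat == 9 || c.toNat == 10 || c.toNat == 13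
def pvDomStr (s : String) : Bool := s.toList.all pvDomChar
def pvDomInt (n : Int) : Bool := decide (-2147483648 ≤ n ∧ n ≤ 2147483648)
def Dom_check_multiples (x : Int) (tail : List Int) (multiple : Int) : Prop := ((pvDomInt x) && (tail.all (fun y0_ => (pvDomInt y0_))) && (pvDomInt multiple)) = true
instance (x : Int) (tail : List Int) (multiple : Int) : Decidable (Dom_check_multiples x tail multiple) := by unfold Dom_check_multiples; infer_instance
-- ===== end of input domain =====

-- B replaces A's slice-off-the-front recursion by an iterative index walk over the unchanged list (simpler decomposition; return value only).


-- ===== PORT A =====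
-- tuple2int(t) = int("".join(map(str, t))); none exactly where Python's int() raises ValueError
def pvTuple2int? (t : List Int) : Option Int :=
  PySem.Int.ofChars? (PySem.Chars.join [] (t.map PySem.Int.toChars))

-- str(n) is never the empty string (used for termination of both ports)
theorem pvToChars_len_pos (n : Int) : 1 ≤ (PySem.Int.toChars n).length := by
  unfold PySem.Int.toChars
  split
  · simp
  · exact Nat.length_toDigits_pos

def check_multiples (x : Int) (tail : List Int) (multiple : Int) : Bool :=
  if tail.length = 0 then true
  else
    let digit_mul := x * multiple
    let nd := (PySem.Int.toChars digit_mul).length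
    match pvTuple2int? (PySem.List.slice tail none (some (nd : Int))) with
    | some v =>
        if v = digit_mul then check_multiples x (PySem.List.slice tail (some (nd : Int)) none) (multiple + 1)
        else false
    | none => false   -- Python raises ValueError here; excluded by Pre_check_multiples
termination_by tail.length
decreasing_by
  rw [PySem.List.slice_from_natCast]
  have h1 := pvToChars_len_pos (x * multiple)
  simp only [List.length_drop]
  omega

-- ===== PORT B =====
-- the while-loop of Source B: pos walks over tail, multiple increments
def cmAltGo (x : Int) (tail : List Int) (pos : Nat) (multiple : Int) : Bool :=
  if h : pos < tail.length then
    let digit_mul := x * multiple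
    let nd := (PySem.Int.toChars digit_mul).length
    match pvTuple2int? (PySem.List.slice tail (some (pos : Int)) (some ((pos : Int) + (nd : Int)))) with
    | some v =>
        if v = digit_mul then cmAltGo x tail (pos + nd) (multiple + 1)
        else false
    | none => false   -- Python raises ValueError here; excluded by Pre_check_multiples
  else true
termination_by tail.length - pos
decreasing_by
  have h1 := pvToChars_len_pos (x * multiple)
  omega

def check_multiples_alt (x : Int) (tail : List Int) (multiple : Int) : Bool :=
  cmAltGo x tail 0 multiple

-- ===== PRECONDITION & SPEC =====
-- Pre_ excludes lists with a negative element after the first: there the concatenated str() digits can put a '-' in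
-- the middle of the number int() parses, so A can raise ValueError mid-run (on some such lists A still returns False
-- before reaching the offending slice; B behaves identically there, raising exactly where A raises).
def Pre_check_multiples (x : Int) (tail : List Int) (multiple : Int) : Prop :=
  ∀ t ∈ tail.tail, 0 ≤ t
instance (x : Int) (tail : List Int) (multiple : Int) : Decidable (Pre_check_multiples x tail multiple) := by unfold Pre_check_multiples; infer_instance

def pvWitness_check_multiples : Int × List Int × Int := (1, [1, 2], 1)

def Spec_check_multiples (x : Int) (tail : List Int) (multiple : Int) (out : Bool) : Prop := out = check_multiples_alt x tail multiple
instance (x : Int) (tail : List Int) (multiple : Int) (out : Bool) : Decidable (Spec_check_multiples x tail multiple out) := by unfold Spec_check_multiples; infer_instance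

-- ===== CLAIM (what is proved, stated in full; the proofs are below) =====
def Claim_equal_check_multiples : Prop := ∀ (x : Int) (tail : List Int) (multiple : Int), Dom_check_multiples x tail multiple → Pre_check_multiples x tail multiple → Spec_check_multiples x tail multiple (check_multiples x tail multiple)

-- ===== LEMMAS AND PROOFS =====

-- loop/recursion alignment: B's loop at index pos computes A's recursion on the dropped suffix
theorem cmAltGo_eq_check (x : Int) (tail : List Int) :
    ∀ (fuel pos : Nat) (multiple : Int), tail.length - pos ≤ fuel →
      cmAltGo x tail pos multiple = check_multiples x (tail.drop pos) multiple := by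
  intro fuel
  induction fuel with
  | zero =>
      intro pos multiple hle
      have hge : tail.length ≤ pos := by omega
      rw [cmAltGo, check_multiples]
      simp [Nat.not_lt.mpr hge, List.drop_eq_nil_of_le hge]
  | succ k ih =>
      intro pos multiple hle
      rw [cmAltGo, check_multiples]
      by_cases hp : pos < tail.length
      · have hnd := pvToChars_len_pos (x * multiple)
        have hlen : ¬ (tail.drop pos).length = 0 := by
          simp only [List.length_drop]; omega
        simp only [dif_pos hp, if_neg hlen]
        rw [PySem.List.slice_natCast_add, PySem.List.slice_to_natCast,
            PySem.List.slice_from_natCast, List.drop_drop]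
        cases hv : pvTuple2int? ((tail.drop pos).take ((PySem.Int.toChars (x * multiple)).length)) with
        | none => rfl
        | some v =>
            by_cases hvm : v = x * multiple
            · simp only [if_pos hvm]
              exact ih (pos + (PySem.Int.toChars (x * multiple)).length) (multiple + 1) (by omega)
            · simp [hvm]
      · have hge : tail.length ≤ pos := by omega
        simp [Nat.not_lt.mpr hge, List.drop_eq_nil_of_le hge]

-- ===== VERDICT (by name: the statement is the Claim_ definition above) =====
theorem check_multiples_spec : Claim_equal_check_multiples := by
  unfold Claim_equal_check_multiples
  intro x tail multiple _ _
  unfold Spec_check_multiples check_multiples_alt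
  rw [cmAltGo_eq_check x tail tail.length 0 multiple (by omega)]
  simp
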